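-- pv_equiv track=rewrite | github.com/LoganKloft/aoc2024 | day_22/part1.py | get_secret_number
-- ===== SOURCE A (Python) =====
-- def get_secret_number(number, iterations):
--     for _ in range(iterations):
--         # step 1
--         intermediate = number * 64
--         number = intermediate ^ number
--         number = number % 16777216
--
--         # step 2
--         intermediate = number // 32
--         number = number ^ intermediate
--         number = number % 16777216
--
--         # step 3
--         intermediate = number * 2048
--         number = number ^ intermediate
--         number = number % 16777216
--
--     return number
-- ===== SOURCE B (Python) =====
-- def get_secret_number(number, iterations):
--     # GF(2) linear-map exponentiation: one prune/mix step is linear over the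
--     # 24-bit state, so iterate it by repeated squaring instead of one-by-one.
--     M = 16777216
--
--     def step(x):
--         x = (x ^ (x * 64)) % M
--         x = (x ^ (x // 32)) % M
--         return (x ^ (x * 2048)) % M
--
--     if iterations <= 0:
--         return number
--     v = step(number)                       # first step; state now in [0, M)
--     cols = [step(1 << i) for i in range(24)]   # images of the basis bits
--
--     def apply(cs, x):
--         y = 0
--         for i in range(24):
--             if (x >> i) & 1:
--                 y ^= cs[i]
--         return y
--
--     e = iterations - 1
--     while e > 0:
--         if e & 1:
--             v = apply(cols, v)
--         cols = [apply(cols, cols[i]) for i in range(24)]   # square the map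
--         e >>= 1
--     return v
-- ===== Notes on version B (the rewrite author's own statement) =====
-- stated objective: faster
-- what changed: Instead of applying the three xor/shift/mod mixing steps once per iteration, B treats one whole step as a GF(2)-linear map on the 24-bit state (its 24 basis-bit images as columns) and raises it to the iteration count by repeated squaring, applying the result to the state after a single normalizing step.
import Mathlib
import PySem

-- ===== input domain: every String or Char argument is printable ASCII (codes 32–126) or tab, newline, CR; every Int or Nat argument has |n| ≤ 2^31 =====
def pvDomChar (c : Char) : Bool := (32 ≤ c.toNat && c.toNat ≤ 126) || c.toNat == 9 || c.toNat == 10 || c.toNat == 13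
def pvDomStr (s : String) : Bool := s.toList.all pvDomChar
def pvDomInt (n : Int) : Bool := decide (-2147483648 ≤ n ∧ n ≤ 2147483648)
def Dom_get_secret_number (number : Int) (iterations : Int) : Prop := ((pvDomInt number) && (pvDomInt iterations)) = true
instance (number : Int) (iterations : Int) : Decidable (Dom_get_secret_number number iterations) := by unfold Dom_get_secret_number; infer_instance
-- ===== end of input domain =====

-- B replaces A's per-iteration loop by exponentiation (by squaring) of the one-step
-- GF(2)-linear map on the 24-bit state: asymptotically faster for large iteration counts.

-- ===== PORT A =====
-- literal transliteration of A's loop body; Python '^' → PySem.Int.bxor, '//' → floordiv, '%' → mod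
def get_secret_number (number : Int) (iterations : Int) : Int :=
  (PySem.List.pyRange 0 iterations 1).foldl (fun number _ =>
    -- step 1
    let intermediate := number * 64
    let number := PySem.Int.bxor intermediate number
    let number := PySem.Int.mod number 16777216
    -- step 2
    let intermediate := PySem.Int.floordiv number 32
    let number := PySem.Int.bxor number intermediate
    let number := PySem.Int.mod number 16777216
    -- step 3
    let intermediate := number * 2048
    let number := PySem.Int.bxor number intermediate
    PySem.Int.mod number 16777216) number

-- ===== PORT B =====
-- Source B's step helper on an arbitrary (possibly negative) Python int
def pvStepB (x : Int) : Int :=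
  let x := PySem.Int.mod (PySem.Int.bxor x (x * 64)) 16777216
  let x := PySem.Int.mod (PySem.Int.bxor x (PySem.Int.floordiv x 32)) 16777216
  PySem.Int.mod (PySem.Int.bxor x (x * 2048)) 16777216

-- the same step on the nonnegative 24-bit states (all values in Source B's matrix part are
-- nonnegative, so they are carried as Nat; exact there: ^ // % on nonneg ints = ^^^ / % on Nat)
def pvStepN (x : Nat) : Nat :=
  let x := (x ^^^ x * 64) % 16777216
  let x := (x ^^^ x / 32) % 16777216
  (x ^^^ x * 2048) % 16777216

-- Source B's apply(cs, x): y = 0; for i in range(24): if (x >> i) & 1: y ^= cs[i]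
def pvApply (cs : List Nat) (x : Nat) : Nat :=
  (List.range 24).foldl (fun y i => if (x >>> i) &&& 1 == 1 then y ^^^ cs.getD i 0 else y) 0

-- Source B's 'cols = [apply(cols, cols[i]) for i in range(24)]'
def pvSquare (cs : List Nat) : List Nat :=
  (List.range 24).map (fun i => pvApply cs (cs.getD i 0))

-- Source B's 'while e > 0: if e & 1: v = apply(cols, v); cols = square; e >>= 1'
def pvPowLoop (cs : List Nat) (v : Nat) (e : Nat) : Nat :=
  if h : e = 0 then v
  else pvPowLoop (pvSquare cs) (if e % 2 = 1 then pvApply cs v else v) (e / 2)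
  termination_by e
  decreasing_by exact Nat.div_lt_self (Nat.pos_of_ne_zero h) (by omega)

def get_secret_number_alt (number : Int) (iterations : Int) : Int :=
  if iterations ≤ 0 then number
  else
    ((pvPowLoop ((List.range 24).map (fun i => pvStepN (1 <<< i)))
        (pvStepB number).toNat (iterations - 1).toNat : Nat) : Int)

-- ===== PRECONDITION & SPEC =====
def Spec_get_secret_number (number : Int) (iterations : Int) (out : Int) : Prop := out = get_secret_number_alt number iterations
instance (number : Int) (iterations : Int) (out : Int) : Decidable (Spec_get_secret_number number iterations out) := by unfold Spec_get_secret_number; infer_instance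

-- ===== CLAIM (what is proved, stated in full; the proofs are below) =====
def Claim_equal_get_secret_number : Prop := ∀ (number : Int) (iterations : Int), Dom_get_secret_number number iterations → Spec_get_secret_number number iterations (get_secret_number number iterations)

-- ===== LEMMAS AND PROOFS =====

-- xor distributes through *2^k, /2^k and %2^k
lemma pvXorMul (a b k : Nat) : (a ^^^ b) * 2 ^ k = a * 2 ^ k ^^^ b * 2 ^ k := by
  rw [← Nat.shiftLeft_eq, ← Nat.shiftLeft_eq, ← Nat.shiftLeft_eq]
  apply Nat.eq_of_testBit_eq
  intro i
  simp [Nat.testBit_shiftLeft, Nat.testBit_xor, Bool.and_xor_distrib_left]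


lemma pvXorDiv (a b k : Nat) : (a ^^^ b) / 2 ^ k = a / 2 ^ k ^^^ b / 2 ^ k := by
  rw [← Nat.shiftRight_eq_div_pow, ← Nat.shiftRight_eq_div_pow, ← Nat.shiftRight_eq_div_pow]
  apply Nat.eq_of_testBit_eq
  intro i
  simp [Nat.testBit_shiftRight, Nat.testBit_xor]


lemma pvXorMod (a b k : Nat) : (a ^^^ b) % 2 ^ k = a % 2 ^ k ^^^ b % 2 ^ k := by
  apply Nat.eq_of_testBit_eq
  intro i
  simp [Nat.testBit_mod_two_pow, Nat.testBit_xor, Bool.and_xor_distrib_left]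


lemma pvXor4 (p q r s : Nat) : (p ^^^ q) ^^^ (r ^^^ s) = (p ^^^ r) ^^^ (q ^^^ s) := by
  simp [Nat.xor_comm, Nat.xor_left_comm]


def pvS1 (x : Nat) : Nat := (x ^^^ x * 2 ^ 6) % 2 ^ 24
def pvS2 (x : Nat) : Nat := (x ^^^ x / 2 ^ 5) % 2 ^ 24
def pvS3 (x : Nat) : Nat := (x ^^^ x * 2 ^ 11) % 2 ^ 24

lemma pvStepN_eq_stages (x : Nat) : pvStepN x = pvS3 (pvS2 (pvS1 x)) := rfl

lemma pvS1_linear (a b : Nat) : pvS1 (a ^^^ b) = pvS1 a ^^^ pvS1 b := by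
  simp only [pvS1]; rw [pvXorMul, pvXor4, pvXorMod]

lemma pvS2_linear (a b : Nat) : pvS2 (a ^^^ b) = pvS2 a ^^^ pvS2 b := by
  simp only [pvS2]; rw [pvXorDiv, pvXor4, pvXorMod]

lemma pvS3_linear (a b : Nat) : pvS3 (a ^^^ b) = pvS3 a ^^^ pvS3 b := by
  simp only [pvS3]; rw [pvXorMul, pvXor4, pvXorMod]

lemma pvStepN_linear (a b : Nat) : pvStepN (a ^^^ b) = pvStepN a ^^^ pvStepN b := by
  simp only [pvStepN_eq_stages, pvS1_linear, pvS2_linear, pvS3_linear]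


lemma pvStepN_lt (x : Nat) : pvStepN x < 2 ^ 24 := by
  have : (16777216 : Nat) = 2 ^ 24 := rfl
  simp only [pvStepN, this]
  exact Nat.mod_lt _ (by norm_num)


-- a cleaner model of pvApply's fold
def pvLinFold (c : Nat → Nat) (x : Nat) (l : List Nat) : Nat :=
  l.foldl (fun y i => y ^^^ (if x.testBit i then c i else 0)) 0

lemma pvApply_eq_linFold (cs : List Nat) (x : Nat) :
    pvApply cs x = pvLinFold (fun i => cs.getD i 0) x (List.range 24) := by
  have hcond : ∀ i : Nat, ((x >>> i) &&& 1 == 1) = x.testBit i := by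
    intro i
    simp [Nat.testBit, Nat.and_one_is_mod, Nat.shiftRight_eq_div_pow,
      Nat.one_and_eq_mod_two]
  simp only [pvApply, pvLinFold, hcond]
  have : (fun (y i : Nat) => if x.testBit i then y ^^^ cs.getD i 0 else y)
       = (fun (y i : Nat) => y ^^^ (if x.testBit i then cs.getD i 0 else 0)) := by
    funext y i
    by_cases h : x.testBit i <;> simp [h]
  rw [this]


lemma pvLinFold_acc (c : Nat → Nat) (x : Nat) (l : List Nat) (y : Nat) :
    l.foldl (fun y i => y ^^^ (if x.testBit i then c i else 0)) y =
      y ^^^ pvLinFold c x l := by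
  induction l generalizing y with
  | nil => simp [pvLinFold]
  | cons i l ih =>
    show List.foldl _ (y ^^^ _) l = y ^^^ pvLinFold c x (i :: l)
    rw [ih]
    show _ = y ^^^ List.foldl _ (0 ^^^ _) l
    rw [ih]
    simp [Nat.xor_assoc]


lemma pvLinFold_cons (c : Nat → Nat) (x : Nat) (i : Nat) (l : List Nat) :
    pvLinFold c x (i :: l) = (if x.testBit i then c i else 0) ^^^ pvLinFold c x l := by
  show List.foldl _ (0 ^^^ _) l = _
  rw [pvLinFold_acc]
  simp


lemma pvLinFold_linear (c : Nat → Nat) (a b : Nat) (l : List Nat) :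
    pvLinFold c (a ^^^ b) l = pvLinFold c a l ^^^ pvLinFold c b l := by
  induction l with
  | nil => simp [pvLinFold]
  | cons i l ih =>
    rw [pvLinFold_cons, pvLinFold_cons, pvLinFold_cons, ih]
    rw [pvXor4]
    congr 1
    rw [Nat.testBit_xor]
    by_cases ha : a.testBit i <;> by_cases hb : b.testBit i <;> simp [ha, hb]


lemma pvLinFold_comp (g c : Nat → Nat) (hg : ∀ a b, g (a ^^^ b) = g a ^^^ g b)
    (hg0 : g 0 = 0) (x : Nat) (l : List Nat) :
    pvLinFold (fun i => g (c i)) x l = g (pvLinFold c x l) := by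
  induction l with
  | nil => simp [pvLinFold, hg0]
  | cons i l ih =>
    rw [pvLinFold_cons, pvLinFold_cons, ih]
    have : (if x.testBit i then g (c i) else 0) = g (if x.testBit i then c i else 0) := by
      by_cases h : x.testBit i <;> simp [h, hg0]
    rw [this, ← hg]


lemma pvLinFold_congr (c c' : Nat → Nat) (x : Nat) (l : List Nat)
    (h : ∀ i ∈ l, c i = c' i) : pvLinFold c x l = pvLinFold c' x l := by
  induction l with
  | nil => rfl
  | cons i l ih =>
    rw [pvLinFold_cons, pvLinFold_cons, h i (by simp),
      ih (fun j hj => h j (by simp [hj]))]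


lemma pvLinFold_lt (c : Nat → Nat) (x : Nat) (l : List Nat)
    (h : ∀ i ∈ l, c i < 2 ^ 24) : pvLinFold c x l < 2 ^ 24 := by
  induction l with
  | nil => simp only [pvLinFold, List.foldl_nil]; positivity
  | cons i l ih =>
    rw [pvLinFold_cons]
    apply Nat.xor_lt_two_pow ?_ (ih (fun j hj => h j (by simp [hj])))
    by_cases hb : x.testBit i
    · simpa [hb] using h i (by simp)
    · norm_num [hb]


lemma pvModSucc (x n : Nat) :
    x % 2 ^ (n + 1) = (x % 2 ^ n) ^^^ (if x.testBit n then 2 ^ n else 0) := by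
  apply Nat.eq_of_testBit_eq
  intro i
  rw [Nat.testBit_xor, Nat.testBit_mod_two_pow, Nat.testBit_mod_two_pow]
  by_cases hb : x.testBit n
  · rcases Nat.lt_trichotomy i n with h | h | h
    · simp [hb, h, Nat.lt_succ_of_lt h, Nat.ne_of_gt h]
    · subst h; simp [hb]
    · rw [decide_eq_false (by omega : ¬ (i < n + 1)), decide_eq_false (by omega : ¬ (i < n))]
      simp [hb, Nat.ne_of_lt h]
  · rcases Nat.lt_trichotomy i n with h | h | h
    · simp [hb, h, Nat.lt_succ_of_lt h]
    · subst h; simp [hb]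
    · rw [decide_eq_false (by omega : ¬ (i < n + 1)), decide_eq_false (by omega : ¬ (i < n))]
      simp [hb]


-- decomposition of a linear map over the bits of its argument
lemma pvFold_basis (f : Nat → Nat) (hf : ∀ a b, f (a ^^^ b) = f a ^^^ f b)
    (hf0 : f 0 = 0) (x n : Nat) :
    pvLinFold (fun i => f (2 ^ i)) x (List.range n) = f (x % 2 ^ n) := by
  induction n with
  | zero =>
    simp only [pvLinFold, List.range_zero, List.foldl_nil, pow_zero, Nat.mod_one]
    exact hf0.symm
  | succ n ih =>
    rw [List.range_succ]
    show List.foldl _ 0 (List.range n ++ [n]) = _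
    rw [List.foldl_append]
    have hacc := pvLinFold_acc (fun i => f (2 ^ i)) x [n] (pvLinFold (fun i => f (2 ^ i)) x (List.range n))
    simp only [pvLinFold] at hacc ⊢
    rw [show (List.foldl (fun y i => y ^^^ if x.testBit i = true then f (2 ^ i) else 0) 0 (List.range n)) = f (x % 2 ^ n) from ih]
    rw [pvModSucc, hf]
    by_cases hb : x.testBit n <;> simp [hb, hf0, Nat.xor_comm]


lemma pvGetD_map_range (g : Nat → Nat) (i : Nat) (h : i < 24) :
    ((List.range 24).map g).getD i 0 = g i := by
  rw [List.getD_eq_getElem?_getD, List.getElem?_map, List.getElem?_range h]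
  rfl


lemma pvApply_linear (cs : List Nat) (a b : Nat) :
    pvApply cs (a ^^^ b) = pvApply cs a ^^^ pvApply cs b := by
  rw [pvApply_eq_linFold, pvApply_eq_linFold, pvApply_eq_linFold, pvLinFold_linear]


lemma pvApply_zero (cs : List Nat) : pvApply cs 0 = 0 := by
  rw [pvApply_eq_linFold]
  have : ∀ l : List Nat, pvLinFold (fun i => cs.getD i 0) 0 l = 0 := by
    intro l
    induction l with
    | nil => rfl
    | cons i l ih => rw [pvLinFold_cons, ih]; simp
  exact this _


lemma pvApply_lt (cs : List Nat) (x : Nat) (h : ∀ i < 24, cs.getD i 0 < 2 ^ 24) :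
    pvApply cs x < 2 ^ 24 := by
  rw [pvApply_eq_linFold]
  exact pvLinFold_lt _ _ _ (fun i hi => h i (List.mem_range.mp hi))


lemma pvApply_square (cs : List Nat) (x : Nat) :
    pvApply (pvSquare cs) x = pvApply cs (pvApply cs x) := by
  rw [pvApply_eq_linFold, pvApply_eq_linFold cs x]
  have h1 : pvLinFold (fun i => (pvSquare cs).getD i 0) x (List.range 24)
      = pvLinFold (fun i => pvApply cs (cs.getD i 0)) x (List.range 24) := by
    apply pvLinFold_congr
    intro i hi
    simp only [pvSquare]
    exact pvGetD_map_range _ i (List.mem_range.mp hi)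
  rw [h1]
  exact pvLinFold_comp (pvApply cs) _ (pvApply_linear cs) (pvApply_zero cs) x _


lemma pvSquare_bounds (cs : List Nat) (h : ∀ i < 24, cs.getD i 0 < 2 ^ 24) :
    ∀ i < 24, (pvSquare cs).getD i 0 < 2 ^ 24 := by
  intro i hi
  simp only [pvSquare]
  rw [pvGetD_map_range _ i hi]
  exact pvApply_lt _ _ h


-- base matrix acts as one step on 24-bit states
lemma pvApply_cols (x : Nat) (hx : x < 2 ^ 24) :
    pvApply ((List.range 24).map (fun i => pvStepN (1 <<< i))) x = pvStepN x := by
  rw [pvApply_eq_linFold]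
  have h1 : pvLinFold (fun i => ((List.range 24).map (fun i => pvStepN (1 <<< i))).getD i 0) x (List.range 24)
      = pvLinFold (fun i => pvStepN (2 ^ i)) x (List.range 24) := by
    apply pvLinFold_congr
    intro i hi
    rw [pvGetD_map_range _ i (List.mem_range.mp hi), Nat.one_shiftLeft]
  rw [h1, pvFold_basis pvStepN pvStepN_linear (by rfl) x 24, Nat.mod_eq_of_lt hx]


lemma pvPowLoop_sem (e : Nat) : ∀ (cs : List Nat) (v p : Nat),
    (∀ i < 24, cs.getD i 0 < 2 ^ 24) →
    (∀ x < 2 ^ 24, pvApply cs x = pvStepN^[p] x) →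
    v < 2 ^ 24 →
    pvPowLoop cs v e = pvStepN^[p * e] v := by
  induction e using Nat.strong_induction_on with
  | _ e ih =>
    intro cs v p hb hap hv
    rw [pvPowLoop]
    by_cases he : e = 0
    · simp [he]
    · simp only [he, dif_neg, not_false_iff]
      have hb' := pvSquare_bounds cs hb
      have hap' : ∀ x < 2 ^ 24, pvApply (pvSquare cs) x = pvStepN^[p + p] x := by
        intro x hx
        rw [pvApply_square, hap x hx, hap _ ?_, Function.iterate_add_apply]
        · clear hap
          induction p generalizing x with
          | zero => simpa using hx
          | succ p ihp =>
            rw [Function.iterate_succ_apply']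
            exact pvStepN_lt _
      have hv' : (if e % 2 = 1 then pvApply cs v else v) < 2 ^ 24 := by
        split
        · exact hap v hv ▸ (by
            clear hap
            induction p generalizing v with
            | zero => simpa using hv
            | succ p ihp =>
              rw [Function.iterate_succ_apply']
              exact pvStepN_lt _)
        · exact hv
      rw [ih (e / 2) (Nat.div_lt_self (Nat.pos_of_ne_zero he) (by omega)) _ _ _ hb' hap' hv']
      have hsplit : (if e % 2 = 1 then pvApply cs v else v) = pvStepN^[p * (e % 2)] v := by
        by_cases hm : e % 2 = 1
        · simp [hm, hap v hv]
        · have : e % 2 = 0 := by omega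
          simp [this]
      rw [hsplit, ← Function.iterate_add_apply]
      congr 1
      conv_rhs => rw [← Nat.div_add_mod e 2]
      ring


-- cast bridge: Source B's step on a nonnegative int is pvStepN
lemma pvStepB_natCast (n : Nat) : pvStepB (n : Int) = (pvStepN n : Int) := by
  have h64 : (64 : Int) = ((64 : Nat) : Int) := by norm_num
  have h32 : (32 : Int) = ((32 : Nat) : Int) := by norm_num
  have h2048 : (2048 : Int) = ((2048 : Nat) : Int) := by norm_num
  have hM : (16777216 : Int) = ((16777216 : Nat) : Int) := by norm_num
  simp only [pvStepB, pvStepN, h64, h32, h2048, hM, ← Nat.cast_mul,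
    PySem.Int.bxor_natCast, PySem.Int.floordiv_natCast, PySem.Int.mod_natCast]


lemma pvStepB_bounds (x : Int) : 0 ≤ pvStepB x ∧ pvStepB x < 2 ^ 24 := by
  have h : pvStepB x = PySem.Int.mod _ 16777216 := rfl
  rw [h, PySem.Int.mod_eq_emod_of_pos (by norm_num)]
  constructor
  · exact Int.emod_nonneg _ (by norm_num)
  · exact Int.emod_lt_of_pos _ (by norm_num)


-- A's loop body is pvStepB
lemma pvBodyA (s : Int) :
    (PySem.Int.mod (PySem.Int.bxor
      (PySem.Int.mod (PySem.Int.bxor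
        (PySem.Int.mod (PySem.Int.bxor (s * 64) s) 16777216)
        (PySem.Int.floordiv (PySem.Int.mod (PySem.Int.bxor (s * 64) s) 16777216) 32)) 16777216)
      ((PySem.Int.mod (PySem.Int.bxor
        (PySem.Int.mod (PySem.Int.bxor (s * 64) s) 16777216)
        (PySem.Int.floordiv (PySem.Int.mod (PySem.Int.bxor (s * 64) s) 16777216) 32)) 16777216) * 2048)) 16777216)
    = pvStepB s := by
  simp only [pvStepB, PySem.Int.bxor_comm (s * 64) s]


lemma pvFoldConst {α : Type} (f : α → α) (l : List Int) (v : α) :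
    l.foldl (fun s _ => f s) v = f^[l.length] v := by
  induction l generalizing v with
  | nil => rfl
  | cons i l ih =>
    simp only [List.foldl_cons, List.length_cons, ih, Function.iterate_succ_apply]


lemma pvIterCast (j : Nat) (n : Nat) : pvStepB^[j] (n : Int) = (pvStepN^[j] n : Int) := by
  induction j generalizing n with
  | zero => rfl
  | succ j ih =>
    rw [Function.iterate_succ_apply, Function.iterate_succ_apply, pvStepB_natCast, ih]


-- ===== VERDICT (by name: the statement is the Claim_ definition above) =====
lemma pvA_eq (number iterations : Int) :
    get_secret_number number iterations
      = pvStepB^[(PySem.List.pyRange 0 iterations 1).length] number := by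
  unfold get_secret_number
  rw [← pvFoldConst pvStepB]
  congr 1
  funext s i
  exact pvBodyA s

lemma pvColsN_bounds : ∀ i < 24,
    ((List.range 24).map (fun i => pvStepN (1 <<< i))).getD i 0 < 2 ^ 24 := by
  intro i hi
  rw [pvGetD_map_range _ i hi]
  exact pvStepN_lt _

-- ===== VERDICT (by name: the statement is the Claim_ definition above) =====
theorem get_secret_number_spec : Claim_equal_get_secret_number := by
  intro number iterations _
  unfold Spec_get_secret_number get_secret_number_alt
  rw [pvA_eq]
  by_cases hle : iterations ≤ 0
  · rw [PySem.List.pyRange_one_eq_nil (by omega)]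
    simp [hle]
  · simp only [hle, if_false]
    have hk : (PySem.List.pyRange 0 iterations 1).length = iterations.toNat := by
      rw [PySem.List.length_pyRange_one]
      congr 1
      omega
    rw [hk]
    obtain ⟨hnn, hlt⟩ := pvStepB_bounds number
    set m : Nat := (pvStepB number).toNat with hm
    have hmc : pvStepB number = (m : Int) := (Int.toNat_of_nonneg hnn).symm
    have hmlt : m < 2 ^ 24 := by omega
    have hsucc : iterations.toNat = (iterations.toNat - 1) + 1 := by omega
    rw [hsucc, Function.iterate_succ_apply, hmc, pvIterCast]
    have hone : ∀ x < 2 ^ 24,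
        pvApply ((List.range 24).map (fun i => pvStepN (1 <<< i))) x = pvStepN^[1] x := by
      intro x hx
      rw [Function.iterate_one]
      exact pvApply_cols x hx
    rw [pvPowLoop_sem _ _ _ 1 pvColsN_bounds hone hmlt, one_mul]
    congr 2
    omega
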